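-- pv_equiv track=rewrite | github.com/dnlmor/zenshin | backend/app/utils/code_parser.py | get_file_statistics
-- ===== SOURCE A (Python) =====
-- from typing import Optional, List, Dict
--
-- def get_file_statistics(content: str) -> Dict[str, int]:
--     """
--     Get basic statistics about a file.
--
--     Args:
--         content: File content
--
--     Returns:
--         dict: Statistics including lines, characters, etc.
--     """
--     lines = content.split('\n')
--
--     return {
--         'total_lines': len(lines),
--         'non_empty_lines': len([line for line in lines if line.strip()]),
--         'characters': len(content),
--         'words': len(content.split()),
--         'max_line_length': max(len(line) for line in lines) if lines else 0
--     }
-- ===== SOURCE B (Python) =====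
-- def get_file_statistics(content: str) -> dict:
--     """Single character-level state machine: one pass over content, never
--     materializing the list of lines or the list of words."""
--     total_lines = 1
--     non_empty_lines = 0
--     cur_len = 0
--     cur_has = False
--     max_len = 0
--     words = 0
--     in_word = False
--     for c in content:
--         if c == '\n':
--             total_lines += 1
--             if cur_has:
--                 non_empty_lines += 1
--             if cur_len > max_len:
--                 max_len = cur_len
--             cur_len = 0
--             cur_has = False
--             in_word = False
--         else:
--             nw = not c.isspace()
--             cur_len += 1
--             cur_has = cur_has or nw
--             if nw and not in_word:
--                 words += 1
--             in_word = nw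
--     if cur_has:
--         non_empty_lines += 1
--     if cur_len > max_len:
--         max_len = cur_len
--     return {
--         'total_lines': total_lines,
--         'non_empty_lines': non_empty_lines,
--         'characters': len(content),
--         'words': words,
--         'max_line_length': max_len,
--     }
-- ===== Notes on version B (the rewrite author's own statement) =====
-- stated objective: alternative
-- what changed: Replaced A's split-into-lines plus four separate aggregate passes (len, filter-comprehension, split(), generator max) by a single character-level state machine that scans content once and never materializes the list of lines or words.
import Mathlib
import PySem

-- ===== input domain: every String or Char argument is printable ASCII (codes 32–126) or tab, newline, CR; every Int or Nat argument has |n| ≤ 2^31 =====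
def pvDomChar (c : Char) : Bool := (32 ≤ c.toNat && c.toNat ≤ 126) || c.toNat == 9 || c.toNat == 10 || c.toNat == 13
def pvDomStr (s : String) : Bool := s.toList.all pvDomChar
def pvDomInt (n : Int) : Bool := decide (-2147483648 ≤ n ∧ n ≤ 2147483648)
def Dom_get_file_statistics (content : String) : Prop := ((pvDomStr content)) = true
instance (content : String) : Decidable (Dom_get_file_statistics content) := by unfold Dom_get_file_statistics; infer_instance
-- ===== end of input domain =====

-- B replaces A's split-into-lines + four separate aggregate passes by a single
-- character-level state machine over content; same return value everywhere.

-- ===== PORT A =====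
def get_file_statistics (content : String) : List (String × Int) :=
  let lines := PySem.Chars.splitOn content.toList ['\n']
  [("total_lines", (lines.length : Int)),
   ("non_empty_lines", ((lines.filter (fun line => !(PySem.Chars.strip line).isEmpty)).length : Int)),
   ("characters", (content.toList.length : Int)),
   ("words", ((PySem.Chars.split₀ content.toList).length : Int)),
   ("max_line_length",
     if lines.isEmpty then 0
     else (PySem.List.max? (lines.map (fun line => (line.length : Int))) id).getD 0)]

-- ===== PORT B =====
-- state = (total_lines, non_empty_lines, cur_len, cur_has, max_len, words, in_word)
def get_file_statistics_alt (content : String) : List (String × Int) :=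
  let s := content.toList.foldl
    (fun (st : Int × Int × Int × Bool × Int × Int × Bool) c =>
      match st with
      | (t, n, cl, ch, m, w, iw) =>
        if c = '\n' then
          (t + 1, n + (if ch then 1 else 0), 0, false, (if cl > m then cl else m), w, false)
        else
          let nw := !PySem.Chars.isspace c
          (t, n, cl + 1, ch || nw, m, w + (if nw && !iw then 1 else 0), nw))
    (1, 0, 0, false, 0, 0, false)
  match s with
  | (t, n, cl, ch, m, w, _) =>
    [("total_lines", t),
     ("non_empty_lines", n + (if ch then 1 else 0)),
     ("characters", (content.toList.length : Int)),
     ("words", w),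
     ("max_line_length", if cl > m then cl else m)]

-- ===== PRECONDITION & SPEC =====
def Spec_get_file_statistics (content : String) (out : List (String × Int)) : Prop := out = get_file_statistics_alt content
instance (content : String) (out : List (String × Int)) : Decidable (Spec_get_file_statistics content out) := by unfold Spec_get_file_statistics; infer_instance

-- ===== CLAIM =====
def Claim_equal_get_file_statistics : Prop := ∀ (content : String), Dom_get_file_statistics content → Spec_get_file_statistics content (get_file_statistics content)

-- ===== LEMMAS AND PROOFS =====

-- non-whitespace test
def pvNws (c : Char) : Bool := !PySem.Chars.isspace c

def pvAnyNws (l : List Char) : Bool := l.any pvNws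

theorem pvAnyNws_nil : pvAnyNws [] = false := rfl

theorem pvAnyNws_cons (c : Char) (l : List Char) : pvAnyNws (c :: l) = (pvNws c || pvAnyNws l) := by
  simp [pvAnyNws]

-- the lines of cs, split at '\n', as (first line, remaining lines)
def pvFL : List Char → List Char × List (List Char)
  | [] => ([], [])
  | c :: r => if c = '\n' then ([], (pvFL r).1 :: (pvFL r).2) else (c :: (pvFL r).1, (pvFL r).2)

-- number of non-blank lines among all COMPLETED lines, first line's blankness adjusted by b
def pvCnt (b : Bool) (x : List Char) : List (List Char) → Int
  | [] => 0
  | y :: ys => (if b || pvAnyNws x then 1 else 0) + pvCnt false y ys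

-- final cur_len
def pvClS (cl : Int) (x : List Char) : List (List Char) → Int
  | [] => cl + (x.length : Int)
  | y :: ys => pvClS 0 y ys

-- final cur_has
def pvChS (ch : Bool) (x : List Char) : List (List Char) → Bool
  | [] => ch || pvAnyNws x
  | y :: ys => pvChS false y ys

-- final max_len before the last flush
def pvMx (m cl : Int) (x : List Char) : List (List Char) → Int
  | [] => m
  | y :: ys => pvMx (if cl + (x.length : Int) > m then cl + (x.length : Int) else m) 0 y ys

-- word count of cs given in_word flag
def pvWc (iw : Bool) : List Char → Int
  | [] => 0
  | c :: r => (if pvNws c && !iw then 1 else 0) + pvWc (pvNws c) r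

-- final in_word flag
def pvIwS (iw : Bool) : List Char → Bool
  | [] => iw
  | c :: r => pvIwS (pvNws c) r


theorem pvCnt_nil (b : Bool) (x : List Char) : pvCnt b x [] = 0 := rfl
theorem pvCnt_cons (b : Bool) (x y : List Char) (ys : List (List Char)) :
    pvCnt b x (y :: ys) = (if b || pvAnyNws x then 1 else 0) + pvCnt false y ys := rfl
theorem pvClS_nil (cl : Int) (x : List Char) : pvClS cl x [] = cl + (x.length : Int) := rfl
theorem pvClS_cons (cl : Int) (x y : List Char) (ys : List (List Char)) :
    pvClS cl x (y :: ys) = pvClS 0 y ys := rfl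
theorem pvChS_nil (ch : Bool) (x : List Char) : pvChS ch x [] = (ch || pvAnyNws x) := rfl
theorem pvChS_cons (ch : Bool) (x y : List Char) (ys : List (List Char)) :
    pvChS ch x (y :: ys) = pvChS false y ys := rfl
theorem pvMx_nil (m cl : Int) (x : List Char) : pvMx m cl x [] = m := rfl
theorem pvMx_cons (m cl : Int) (x y : List Char) (ys : List (List Char)) :
    pvMx m cl x (y :: ys) = pvMx (if cl + (x.length : Int) > m then cl + (x.length : Int) else m) 0 y ys := rfl
theorem pvWc_nil (iw : Bool) : pvWc iw [] = 0 := rfl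
theorem pvWc_cons (iw : Bool) (c : Char) (r : List Char) :
    pvWc iw (c :: r) = (if pvNws c && !iw then 1 else 0) + pvWc (pvNws c) r := rfl
theorem pvIwS_cons (iw : Bool) (c : Char) (r : List Char) : pvIwS iw (c :: r) = pvIwS (pvNws c) r := rfl


theorem pvCnt_shift (ch : Bool) (c : Char) (x : List Char) (xs : List (List Char)) :
    pvCnt ch (c :: x) xs = pvCnt (ch || pvNws c) x xs := by
  cases xs with
  | nil => rfl
  | cons y ys =>
    simp only [pvCnt_cons, pvAnyNws_cons, Bool.or_assoc]

theorem pvClS_shift (cl : Int) (c : Char) (x : List Char) (xs : List (List Char)) :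
    pvClS cl (c :: x) xs = pvClS (cl + 1) x xs := by
  cases xs with
  | nil => simp only [pvClS_nil, List.length_cons]; push_cast; ring
  | cons y ys => rfl

theorem pvChS_shift (ch : Bool) (c : Char) (x : List Char) (xs : List (List Char)) :
    pvChS ch (c :: x) xs = pvChS (ch || pvNws c) x xs := by
  cases xs with
  | nil => simp only [pvChS_nil, pvAnyNws_cons, Bool.or_assoc]
  | cons y ys => rfl

theorem pvMx_shift (m cl : Int) (c : Char) (x : List Char) (xs : List (List Char)) :
    pvMx m cl (c :: x) xs = pvMx m (cl + 1) x xs := by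
  cases xs with
  | nil => rfl
  | cons y ys =>
    simp only [pvMx_cons, List.length_cons]
    have h : cl + ((x.length : Int) + 1) = cl + 1 + (x.length : Int) := by ring
    push_cast
    rw [h]

-- ---- the fold characterization ----
theorem pv_fold (cs : List Char) : ∀ (t n cl : Int) (ch : Bool) (m w : Int) (iw : Bool),
    cs.foldl
      (fun (st : Int × Int × Int × Bool × Int × Int × Bool) c =>
        match st with
        | (t, n, cl, ch, m, w, iw) =>
          if c = '\n' then
            (t + 1, n + (if ch then 1 else 0), 0, false, (if cl > m then cl else m), w, false)
          else
            let nw := !PySem.Chars.isspace c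
            (t, n, cl + 1, ch || nw, m, w + (if nw && !iw then 1 else 0), nw))
      (t, n, cl, ch, m, w, iw)
    = (t + ((pvFL cs).2.length : Int),
       n + pvCnt ch (pvFL cs).1 (pvFL cs).2,
       pvClS cl (pvFL cs).1 (pvFL cs).2,
       pvChS ch (pvFL cs).1 (pvFL cs).2,
       pvMx m cl (pvFL cs).1 (pvFL cs).2,
       w + pvWc iw cs,
       pvIwS iw cs) := by
  induction cs with
  | nil => intro t n cl ch m w iw; simp [pvFL, pvCnt, pvClS, pvChS, pvMx, pvWc, pvIwS, pvAnyNws_nil]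
  | cons c r ih =>
    intro t n cl ch m w iw
    rw [List.foldl_cons, ih]
    by_cases hc : c = '\n'
    · subst hc
      have hnw : pvNws '\n' = false := by decide
      simp [pvFL, pvCnt_cons, pvClS_cons, pvChS_cons, pvMx_cons, pvWc_cons, pvIwS_cons,
        hnw, pvAnyNws_nil, pvNws]
      have his : PySem.Chars.isspace '\n' = true := by decide
      refine ⟨by ring, by ring, ?_, ?_⟩ <;> simp [his]
    · have hnw : (!PySem.Chars.isspace c) = pvNws c := rfl
      simp only [pvFL, if_neg hc]
      simp [hc, pvWc_cons, pvIwS_cons, hnw]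
      refine ⟨(pvCnt_shift ch c _ _).symm, (pvClS_shift cl c _ _).symm,
        (pvChS_shift ch c _ _).symm, (pvMx_shift m cl c _ _).symm, by ring⟩


-- ---- splitOn characterization ----
theorem pv_go (cs : List Char) : ∀ (fuel : Nat), cs.length < fuel → ∀ (cur : List Char) (acc : List (List Char)),
    PySem.Chars.splitOn.go ['\n'] fuel cs cur acc
      = acc.reverse ++ (cur.reverse ++ (pvFL cs).1) :: (pvFL cs).2 := by
  induction cs with
  | nil =>
    intro fuel hf cur acc
    cases fuel with
    | zero => omega
    | succ k =>
      rw [PySem.Chars.splitOn.go]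
      simp [pvFL]
      omega
  | cons c r ih =>
    intro fuel hf cur acc
    cases fuel with
    | zero => omega
    | succ k =>
      have hlen : r.length < k := by simp at hf; omega
      by_cases hc : c = '\n'
      · subst hc
        rw [PySem.Chars.splitOn.go]
        rw [if_pos (by simp [List.isPrefixOf])]
        have hd : List.drop ['\n'].length ('\n' :: r) = r := rfl
        rw [hd, ih k hlen [] (cur.reverse :: acc)]
        simp [pvFL]
      · rw [PySem.Chars.splitOn.go]
        rw [if_neg (by simp [List.isPrefixOf, Ne.symm hc])]
        rw [ih k hlen (c :: cur) acc]
        simp [pvFL, hc]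

theorem pv_splitOn_eq (cs : List Char) :
    PySem.Chars.splitOn cs ['\n'] = (pvFL cs).1 :: (pvFL cs).2 := by
  rw [PySem.Chars.splitOn]
  rw [pv_go cs (cs.length + 1) (by omega)]
  simp

-- ---- strip characterization ----
theorem pv_dropWhile_forall (p : Char → Bool) (l : List Char) :
    (∀ c ∈ l.dropWhile p, p c = true) ↔ (∀ c ∈ l, p c = true) := by
  induction l with
  | nil => simp
  | cons c r ih =>
    by_cases h : p c
    · simp [List.dropWhile_cons, h, ih]
    · simp [List.dropWhile_cons, h]

theorem pv_strip_nil_iff (l : List Char) :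
    PySem.Chars.strip l = [] ↔ ∀ c ∈ l, PySem.Chars.isspace c = true := by
  rw [PySem.Chars.strip, PySem.Chars.rstrip, PySem.Chars.lstrip,
    List.reverse_eq_nil_iff, List.dropWhile_eq_nil_iff]
  simp only [List.mem_reverse]
  exact pv_dropWhile_forall _ _

theorem pv_strip_isEmpty (l : List Char) :
    (PySem.Chars.strip l).isEmpty = !pvAnyNws l := by
  by_cases h : pvAnyNws l
  · simp only [h, Bool.not_true]
    rw [List.isEmpty_eq_false_iff, Ne, pv_strip_nil_iff]
    simp only [pvAnyNws, List.any_eq_true, pvNws] at h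
    obtain ⟨c, hc, hcs⟩ := h
    intro hall
    have := hall c hc
    simp [this] at hcs
  · simp only [Bool.not_eq_true] at h
    simp only [h, Bool.not_false]
    rw [List.isEmpty_iff, pv_strip_nil_iff]
    intro c hc
    simp only [pvAnyNws, List.any_eq_false, pvNws] at h
    simpa using h c hc

-- ---- non_empty_lines ----
theorem pv_cnt_filter (xs : List (List Char)) : ∀ (x : List Char) (b : Bool),
    pvCnt b x xs + (if pvChS b x xs then 1 else 0)
      = (if b || pvAnyNws x then 1 else 0) + ((xs.filter pvAnyNws).length : Int) := by
  induction xs with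
  | nil => intro x b; simp [pvCnt_nil, pvChS_nil]
  | cons y ys ih =>
    intro x b
    rw [pvCnt_cons, pvChS_cons, add_assoc, ih y false]
    simp only [Bool.false_or, List.filter_cons]
    by_cases hy : pvAnyNws y <;> simp [hy] <;> push_cast <;> ring

-- ---- max_line_length ----
theorem pv_max'_eq_max (m x : Int) : (if x > m then x else m) = max m x := by omega

theorem pv_mx_foldl (xs : List (List Char)) : ∀ (x : List Char) (m cl : Int),
    (if pvClS cl x xs > pvMx m cl x xs then pvClS cl x xs else pvMx m cl x xs)
      = (xs.map (fun l => (l.length : Int))).foldl max (max m (cl + (x.length : Int))) := by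
  induction xs with
  | nil => intro x m cl; simp [pvClS_nil, pvMx_nil, pv_max'_eq_max]
  | cons y ys ih =>
    intro x m cl
    rw [pvClS_cons, pvMx_cons, ih y _ 0, pv_max'_eq_max]
    simp

theorem pv_max?_cons (y : Int) (t : List Int) :
    PySem.List.max? (y :: t) id = some (t.foldl max y) := by
  induction t generalizing y with
  | nil => rfl
  | cons z s ih =>
    have h : PySem.List.max? (y :: z :: s) id = PySem.List.max? (max y z :: s) id := by
      unfold PySem.List.max?
      rw [List.foldl_cons, List.foldl_cons, List.foldl_cons]
      congr 1
      show (if id y < id z then some z else some y) = some (max y z)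
      split <;> simp_all <;> omega
    rw [h, ih (max y z), List.foldl_cons]

-- ---- words ----
theorem pv_split0_go (cs : List Char) : ∀ (cur : List Char) (acc : List (List Char)),
    ((PySem.Chars.split₀.go cs cur acc).length : Int)
      = (acc.length : Int) + (if cur.isEmpty then 0 else 1) + pvWc (!cur.isEmpty) cs := by
  induction cs with
  | nil =>
    intro cur acc
    rw [PySem.Chars.split₀.go]
    cases cur <;> simp [pvWc_nil]
  | cons c r ih =>
    intro cur acc
    rw [PySem.Chars.split₀.go]
    by_cases hs : PySem.Chars.isspace c
    · have hnw : pvNws c = false := by simp [pvNws, hs]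
      cases cur with
      | nil => simp [hs, ih, pvWc_cons, hnw]
      | cons d ds => simp [hs, ih, pvWc_cons, hnw]
    · have hnw : pvNws c = true := by simp [pvNws, hs]
      rw [if_neg (by simp [hs])]
      rw [ih]
      cases cur <;> (simp [pvWc_cons, hnw]; try ring)

theorem pv_split0_len (cs : List Char) :
    ((PySem.Chars.split₀ cs).length : Int) = pvWc false cs := by
  rw [PySem.Chars.split₀, pv_split0_go]
  simp

-- ===== VERDICT =====
theorem get_file_statistics_spec : Claim_equal_get_file_statistics := by
  intro content _
  unfold Spec_get_file_statistics get_file_statistics get_file_statistics_alt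
  rw [pv_fold, pv_splitOn_eq]
  simp only [List.isEmpty_cons, if_neg Bool.false_ne_true]
  have hfilter : ((pvFL content.toList).1 :: (pvFL content.toList).2).filter
        (fun line => !(PySem.Chars.strip line).isEmpty)
      = ((pvFL content.toList).1 :: (pvFL content.toList).2).filter pvAnyNws := by
    apply List.filter_congr
    intro x _
    rw [pv_strip_isEmpty, Bool.not_not]
  rw [hfilter]
  have hne := pv_cnt_filter (pvFL content.toList).2 (pvFL content.toList).1 false
  have hmx := pv_mx_foldl (pvFL content.toList).2 (pvFL content.toList).1 0 0
  have hmax : PySem.List.max? (((pvFL content.toList).1 :: (pvFL content.toList).2).map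
        (fun line => (line.length : Int))) id
      = some (((pvFL content.toList).2.map (fun l => (l.length : Int))).foldl max
          ((pvFL content.toList).1.length : Int)) := by
    rw [List.map_cons, pv_max?_cons]
  rw [hmax]
  simp only [List.filter_cons, List.length_cons, Option.getD_some]
  simp only [List.cons.injEq, Prod.mk.injEq, and_true]
  refine ⟨⟨trivial, by push_cast; ring⟩, ⟨trivial, ?_⟩, trivial, ⟨trivial, ?_⟩, trivial, ?_⟩
  · rw [zero_add, hne]
    by_cases hp : pvAnyNws (pvFL content.toList).1 <;> simp [hp] <;> push_cast <;> ring
  · rw [pv_split0_len, zero_add]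
  · rw [hmx]
    simp
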